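-- pv_equiv track=rewrite | github.com/Xin-DongXu/AF3Parallel | AF3_JSON_Integrator.py | next_chain_id
-- ===== SOURCE A (Python) =====
-- import itertools
-- from typing import Any, Dict, Iterable, List, Optional, Sequence, Tuple, Union
--
-- def _all_chain_ids_of_length(n: int) -> Iterable[str]:
--     for tup in itertools.product("ABCDEFGHIJKLMNOPQRSTUVWXYZ", repeat=n):
--         yield "".join(tup)
--
-- def next_chain_id(used: Iterable[str]) -> str:
--     used_set = set(used)
--     n = 1
--     while True:
--         for cid in _all_chain_ids_of_length(n):
--             if cid not in used_set:
--                 return cid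
--         n += 1
-- ===== SOURCE B (Python) =====
-- import itertools
--
-- def next_chain_id(used):
--     used_set = set(used)
--     for k in itertools.count(1):
--         t = k
--         s = ""
--         while t > 0:
--             t -= 1
--             s = chr(ord('A') + t % 26) + s
--             t //= 26
--         if s not in used_set:
--             return s
-- ===== Notes on version B (the rewrite author's own statement) =====
-- stated objective: alternative
-- what changed: B replaces the nested product-over-length enumeration of all candidate IDs with a single counter k=1,2,... converted directly to its chain ID by bijective base-26, checking each against a prebuilt set.
import Mathlib
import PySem

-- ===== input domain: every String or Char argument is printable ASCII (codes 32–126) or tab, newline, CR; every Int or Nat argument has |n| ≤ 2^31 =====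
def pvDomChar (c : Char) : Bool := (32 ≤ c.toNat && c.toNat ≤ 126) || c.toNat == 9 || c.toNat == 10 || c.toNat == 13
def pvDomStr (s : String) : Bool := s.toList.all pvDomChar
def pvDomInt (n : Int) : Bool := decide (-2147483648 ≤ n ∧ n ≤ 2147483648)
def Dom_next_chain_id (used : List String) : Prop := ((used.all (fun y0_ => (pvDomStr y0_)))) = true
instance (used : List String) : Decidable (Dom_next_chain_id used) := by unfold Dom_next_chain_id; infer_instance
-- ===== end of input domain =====

-- B replaces A's nested product-over-length enumeration by a single counter converted
-- directly to its ID via bijective base-26; both loops are made total with fuel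
-- (used.length + 1 rounds provably suffice — see the lemmas below).

-- ===== PORT A =====
def pyUpper : List Char := "ABCDEFGHIJKLMNOPQRSTUVWXYZ".toList

-- itertools.product("A…Z", repeat = n), each tuple "".join-ed (last coordinate varies fastest)
def allChainIdsOfLength : Nat → List (List Char)
  | 0 => [[]]
  | n+1 => (allChainIdsOfLength n).flatMap (fun w => pyUpper.map (fun c => w ++ [c]))

-- the 'while True' loop over n = 1, 2, …; fuel only makes it total (it is never exhausted)
def nextChainLoopA (usedSet : PySem.Set String) : Nat → Nat → String
  | _, 0 => ""
  | n, fuel+1 =>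
    match (allChainIdsOfLength n).find? (fun w => !(PySem.Set.contains usedSet (String.ofList w))) with
    | some w => String.ofList w
    | none => nextChainLoopA usedSet (n+1) fuel

def next_chain_id (used : List String) : String :=
  nextChainLoopA (PySem.Set.ofList used) 1 (used.length + 1)

-- ===== PORT B =====
-- the 'while t > 0: t -= 1; s = chr(65 + t%26) + s; t //= 26' loop
def convChainId : Nat → List Char → List Char
  | 0, s => s
  | t+1, s => convChainId (t / 26) (Char.ofNat (65 + t % 26) :: s)
decreasing_by exact Nat.lt_succ_of_le (Nat.div_le_self t 26)

-- the 'for k in itertools.count(1)' loop; fuel only makes it total (it is never exhausted)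
def nextChainLoopB (usedSet : PySem.Set String) : Nat → Nat → String
  | _, 0 => ""
  | k, fuel+1 =>
    let s := String.ofList (convChainId k [])
    if PySem.Set.contains usedSet s then nextChainLoopB usedSet (k+1) fuel else s

def next_chain_id_alt (used : List String) : String :=
  nextChainLoopB (PySem.Set.ofList used) 1 (used.length + 1)

-- ===== PRECONDITION & SPEC =====
def Spec_next_chain_id (used : List String) (out : String) : Prop := out = next_chain_id_alt used
instance (used : List String) (out : String) : Decidable (Spec_next_chain_id used out) := by unfold Spec_next_chain_id; infer_instance

-- ===== CLAIM (what is proved, stated in full; the proofs are below) =====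
def Claim_equal_next_chain_id : Prop := ∀ (used : List String), Dom_next_chain_id used → Spec_next_chain_id used (next_chain_id used)

-- ===== LEMMAS AND PROOFS =====

-- the k-th chain ID (k ≥ 1) in canonical order, via bijective base-26
def idOf : Nat → List Char
  | 0 => []
  | t+1 => idOf (t / 26) ++ [Char.ofNat (65 + t % 26)]
decreasing_by exact Nat.lt_succ_of_le (Nat.div_le_self t 26)

-- first counter value of the block of IDs of length n
def sStart : Nat → Nat
  | 0 => 0
  | n+1 => 26 * sStart n + 1

lemma conv_eq_idOf : ∀ t s, convChainId t s = idOf t ++ s := by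
  intro t
  induction t using Nat.strong_induction_on with
  | _ t ih =>
    intro s
    match t with
    | 0 => simp [convChainId, idOf]
    | t+1 =>
      rw [convChainId, idOf, ih (t / 26) (Nat.lt_succ_of_le (Nat.div_le_self t 26))]
      simp

lemma pyUpper_eq : pyUpper = (List.range 26).map (fun c => Char.ofNat (65 + c)) := by decide

lemma sStart_succ' (n : Nat) : sStart (n + 1) = sStart n + 26 ^ n := by
  induction n with
  | zero => rfl
  | succ n ih =>
    show 26 * sStart (n+1) + 1 = (26 * sStart n + 1) + 26 ^ (n+1)
    rw [ih]; ring

lemma le_sStart (n : Nat) : n ≤ sStart n := by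
  induction n with
  | zero => exact Nat.le_refl 0
  | succ n ih => show n + 1 ≤ 26 * sStart n + 1; omega

lemma idOf_block (j c : Nat) (hc : c < 26) :
    idOf (26 * j + c + 1) = idOf j ++ [Char.ofNat (65 + c)] := by
  rw [idOf]
  have h1 : (26 * j + c) / 26 = j := by omega
  have h2 : (26 * j + c) % 26 = c := by omega
  rw [h1, h2]

lemma range'_block : ∀ (m b : Nat),
    List.range' (26 * b + 1) (26 * m) = (List.range' b m).flatMap (fun j => List.range' (26 * j + 1) 26) := by
  intro m
  induction m with
  | zero => intro b; simp
  | succ m ih =>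
    intro b
    rw [show 26 * (m + 1) = 26 + 26 * m by ring, ← List.range'_append]
    rw [show 26 * b + 1 + 26 = 26 * (b + 1) + 1 by ring, ih (b+1)]
    simp [List.range'_succ]

lemma blocks_eq : ∀ n, allChainIdsOfLength n = (List.range' (sStart n) (26 ^ n)).map idOf := by
  intro n
  induction n with
  | zero => simp [allChainIdsOfLength, sStart, idOf]
  | succ n ih =>
    rw [allChainIdsOfLength, ih, pyUpper_eq]
    show _ = (List.range' (26 * sStart n + 1) (26 ^ (n+1))).map idOf
    rw [show (26:Nat) ^ (n+1) = 26 * 26 ^ n by ring, range'_block (26 ^ n) (sStart n)]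
    rw [List.map_flatMap, List.flatMap_map]
    apply List.flatMap_congr
    intro j _
    rw [List.range'_eq_map_range]
    simp only [List.map_map]
    apply List.map_congr_left
    intro c hc
    simp only [List.mem_range] at hc
    simp only [Function.comp]
    rw [show 26 * j + 1 + c = 26 * j + c + 1 by omega, idOf_block j c hc]

lemma char_inj : ∀ c < 26, ∀ d < 26, Char.ofNat (65 + c) = Char.ofNat (65 + d) → c = d := by decide

lemma idOf_inj : ∀ a b, idOf a = idOf b → a = b := by
  intro a
  induction a using Nat.strong_induction_on with
  | _ a ih =>
    intro b h
    match a, b with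
    | 0, 0 => rfl
    | 0, b+1 => rw [idOf, idOf] at h; simp at h
    | a+1, 0 => rw [idOf, idOf] at h; simp at h
    | a+1, b+1 =>
      rw [idOf, idOf] at h
      obtain ⟨hpre, hlast⟩ := List.append_inj' h rfl
      simp only [List.cons.injEq] at hlast
      have hmod : a % 26 = b % 26 :=
        char_inj _ (Nat.mod_lt a (by omega)) _ (Nat.mod_lt b (by omega)) hlast.1
      have hdiv : a / 26 = b / 26 :=
        ih (a / 26) (Nat.lt_succ_of_le (Nat.div_le_self a 26)) (b / 26) hpre
      omega

-- find? over a mapped index range: finds idOf m when m is the first index satisfying p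
lemma find?_map_range' (p : List Char → Bool) :
    ∀ (len st m : Nat), st ≤ m → m < st + len → p (idOf m) = true →
    (∀ j, st ≤ j → j < m → p (idOf j) = false) →
    ((List.range' st len).map idOf).find? p = some (idOf m) := by
  intro len
  induction len with
  | zero => intro st m h1 h2; omega
  | succ len ih =>
    intro st m h1 h2 hp hmin
    rw [List.range'_succ, List.map_cons, List.find?_cons]
    by_cases hst : st = m
    · subst hst; rw [hp]
    · have hlt : st < m := lt_of_le_of_ne h1 hst
      rw [hmin st (le_refl st) hlt]
      exact ih (st+1) m hlt (by omega) hp (fun j hj1 hj2 => hmin j (by omega) hj2)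

lemma find?_map_range'_none (p : List Char → Bool) (len st : Nat)
    (h : ∀ j, st ≤ j → j < st + len → p (idOf j) = false) :
    ((List.range' st len).map idOf).find? p = none := by
  rw [List.find?_eq_none]
  intro x hx
  simp only [List.mem_map, List.mem_range'_1] at hx
  obtain ⟨j, ⟨hj1, hj2⟩, rfl⟩ := hx
  rw [h j hj1 hj2]; simp

lemma loopB_correct (usedSet : PySem.Set String) :
    ∀ (fuel k m : Nat), k ≤ m → m < k + fuel →
    String.ofList (idOf m) ∉ usedSet →
    (∀ j, k ≤ j → j < m → String.ofList (idOf j) ∈ usedSet) →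
    nextChainLoopB usedSet k fuel = String.ofList (idOf m) := by
  intro fuel
  induction fuel with
  | zero => intro k m h1 h2; omega
  | succ fuel ih =>
    intro k m h1 h2 hm hmin
    rw [nextChainLoopB]
    simp only [conv_eq_idOf, List.append_nil]
    by_cases hk : k = m
    · subst hk
      have : PySem.Set.contains usedSet (String.ofList (idOf k)) = false := by
        simp [hm]
      rw [this]; simp
    · have hlt : k < m := lt_of_le_of_ne h1 hk
      have : PySem.Set.contains usedSet (String.ofList (idOf k)) = true :=
        (PySem.Set.contains_iff _ _).mpr (hmin k (le_refl k) hlt)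
      rw [this]
      simp only [if_true]
      exact ih (k+1) m hlt (by omega) hm (fun j hj1 hj2 => hmin j (by omega) hj2)

lemma loopA_correct (usedSet : PySem.Set String) :
    ∀ (fuel n m : Nat), sStart n ≤ m → m < sStart (n + fuel) →
    String.ofList (idOf m) ∉ usedSet →
    (∀ j, sStart n ≤ j → j < m → String.ofList (idOf j) ∈ usedSet) →
    nextChainLoopA usedSet n fuel = String.ofList (idOf m) := by
  intro fuel
  induction fuel with
  | zero =>
    intro n m h1 h2
    rw [Nat.add_zero] at h2; omega
  | succ fuel ih =>
    intro n m h1 h2 hm hmin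
    rw [nextChainLoopA, blocks_eq]
    have hs : sStart (n + 1) = sStart n + 26 ^ n := sStart_succ' n
    have hpow : (0:Nat) < 26 ^ n := Nat.pow_pos (by norm_num)
    by_cases hblk : m < sStart n + 26 ^ n
    · rw [find?_map_range' _ (26 ^ n) (sStart n) m h1 hblk
        (by simp [hm])
        (fun j hj1 hj2 => by simp [hmin j hj1 hj2])]
    · rw [find?_map_range'_none _ (26 ^ n) (sStart n)
        (fun j hj1 hj2 => by simp [hmin j hj1 (by omega)])]
      have h2' : m < sStart ((n + 1) + fuel) := by
        rw [show (n + 1) + fuel = n + (fuel + 1) by omega]; exact h2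
      exact ih (n+1) m (by omega) h2' hm (fun j hj1 hj2 => hmin j (by omega) hj2)

lemma exists_free (used : List String) :
    ∃ m, 1 ≤ m ∧ m ≤ used.length + 1 ∧
      String.ofList (idOf m) ∉ PySem.Set.ofList used := by
  by_contra hcon
  push_neg at hcon
  have hall : ∀ m, 1 ≤ m → m ≤ used.length + 1 → String.ofList (idOf m) ∈ used := by
    intro m h1 h2
    exact (PySem.Set.mem_ofList _ _).mp (hcon m h1 h2)
  set L := used.length with hL
  set l : List String := (List.range' 1 (L + 1)).map (fun k => String.ofList (idOf k)) with hl
  have hnodup : l.Nodup := by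
    rw [hl]
    apply List.Nodup.map_on
    · intro a _ b _ hab
      apply idOf_inj
      have h' : (String.ofList (idOf a)).toList = (String.ofList (idOf b)).toList := by rw [hab]
      simpa using h'
    · exact List.nodup_range'
  have hsub : ∀ x ∈ l, x ∈ used := by
    intro x hx
    rw [hl] at hx
    simp only [List.mem_map, List.mem_range'_1] at hx
    obtain ⟨k, ⟨hk1, hk2⟩, rfl⟩ := hx
    exact hall k hk1 (by omega)
  have hcard : l.toFinset.card ≤ used.toFinset.card :=
    Finset.card_le_card (fun x hx => List.mem_toFinset.mpr (hsub x (List.mem_toFinset.mp hx)))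
  have h1 : l.toFinset.card = L + 1 := by
    rw [List.toFinset_card_of_nodup hnodup, hl]; simp
  have h2 : used.toFinset.card ≤ L := by
    rw [hL]; exact used.toFinset_card_le
  omega

-- ===== VERDICT (by name: the statement is the Claim_ definition above) =====
theorem next_chain_id_spec : Claim_equal_next_chain_id := by
  intro used _
  unfold Spec_next_chain_id next_chain_id next_chain_id_alt
  obtain ⟨m0, hm01, hm02, hm0⟩ := exists_free used
  have hex : ∃ m, 1 ≤ m ∧ String.ofList (idOf m) ∉ PySem.Set.ofList used := ⟨m0, hm01, hm0⟩
  classical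
  obtain ⟨hm1, hmfree⟩ := Nat.find_spec hex
  set m := Nat.find hex with hmdef
  have hmle : m ≤ used.length + 1 := by
    have := Nat.find_min' hex ⟨hm01, hm0⟩; omega
  have hmin : ∀ j, 1 ≤ j → j < m → String.ofList (idOf j) ∈ PySem.Set.ofList used := by
    intro j hj1 hj2
    have h' := Nat.find_min hex hj2
    push_neg at h'
    exact h' hj1
  have hs1 : sStart 1 = 1 := rfl
  rw [loopA_correct (PySem.Set.ofList used) (used.length + 1) 1 m (by omega)
      (by have := le_sStart (1 + (used.length + 1)); omega) hmfree
      (fun j hj1 hj2 => hmin j (by omega) hj2),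
    loopB_correct (PySem.Set.ofList used) (used.length + 1) 1 m hm1 (by omega) hmfree hmin]
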